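-- pv_equiv track=rewrite | github.com/DmitriyOzyabkin/python_intro_seminar04 | HW02.py | is_poly
-- ===== SOURCE A (Python) =====
-- def is_poly(init_string: str) -> bool:
--
--     # Create dictionary with letters and count them
--     letter_dict = {}
--     for letter in init_string:
--         # if letter in letter_dict.keys():
--         #     letter_dict[letter] += 1
--         # else:
--         #     letter_dict[letter] = 1
--
--         letter_dict[letter] = letter_dict.get(letter, 0) + 1
--
--     # The number of letters that occurred an odd number of times
--
--     odd_letter = 0
--     for letter in letter_dict.keys():
--         if letter_dict[letter] % 2 != 0:
--             odd_letter += 1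
--     if odd_letter > 1:
--         return False
--     else:
--         return True
-- ===== SOURCE B (Python) =====
-- def is_poly(init_string: str) -> bool:
--     # Single pass: keep the set of characters seen an odd number of times.
--     odd = set()
--     for ch in init_string:
--         if ch in odd:
--             odd.discard(ch)
--         else:
--             odd.add(ch)
--     return len(odd) <= 1
-- ===== Notes on version B (the rewrite author's own statement) =====
-- stated objective: idiomatic
-- what changed: Replaced the two-phase dict frequency count plus odd-scanning loop by a single pass that toggles each character in a set of odd-count characters, returning len(set) <= 1.
import Mathlib
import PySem

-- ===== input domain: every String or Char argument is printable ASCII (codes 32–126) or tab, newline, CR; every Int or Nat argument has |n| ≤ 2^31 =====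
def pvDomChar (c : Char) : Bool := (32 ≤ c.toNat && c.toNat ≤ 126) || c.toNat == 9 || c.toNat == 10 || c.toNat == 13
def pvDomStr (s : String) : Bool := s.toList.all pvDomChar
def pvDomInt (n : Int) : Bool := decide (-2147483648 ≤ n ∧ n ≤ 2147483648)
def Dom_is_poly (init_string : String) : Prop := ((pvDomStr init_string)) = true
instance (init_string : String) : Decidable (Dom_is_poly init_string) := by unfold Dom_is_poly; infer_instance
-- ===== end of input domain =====

-- B replaces the dict frequency count plus odd-scanning loop by one pass toggling a set of odd-count characters (idiomatic single pass).


-- ===== PORT A =====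
def is_poly (init_string : String) : Bool :=
  -- letter_dict[letter] = letter_dict.get(letter, 0) + 1
  let letter_dict : PySem.Dict Char Int :=
    init_string.toList.foldl (fun d c => d.insert c (d.getD c 0 + 1)) PySem.Dict.empty
  -- for letter in letter_dict.keys(): if letter_dict[letter] % 2 != 0: odd_letter += 1
  let odd_letter : Int :=
    letter_dict.keys.foldl
      (fun acc c => if PySem.Int.mod (letter_dict.getD c 0) 2 != 0 then acc + 1 else acc) 0
  if odd_letter > 1 then false else true

-- ===== PORT B =====
-- the toggle: remove from the set if present, else add
def pvToggle (s : PySem.Set Char) (c : Char) : PySem.Set Char :=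
  if PySem.Set.contains s c then PySem.Set.discard s c else PySem.Set.add s c

def is_poly_alt (init_string : String) : Bool :=
  let odd : PySem.Set Char := init_string.toList.foldl pvToggle PySem.Set.empty
  decide (PySem.Set.len odd ≤ 1)

-- ===== PRECONDITION & SPEC =====
def Spec_is_poly (init_string : String) (out : Bool) : Prop := out = is_poly_alt init_string
instance (init_string : String) (out : Bool) : Decidable (Spec_is_poly init_string out) := by unfold Spec_is_poly; infer_instance

-- ===== CLAIM (what is proved, stated in full; the proofs are below) =====
def Claim_equal_is_poly : Prop := ∀ (init_string : String), Dom_is_poly init_string → Spec_is_poly init_string (is_poly init_string)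

-- ===== LEMMAS AND PROOFS =====

lemma toggle_of_mem (s : PySem.Set Char) (c : Char) (h : c ∈ s) :
    pvToggle s c = PySem.Set.discard s c := by
  simp [pvToggle, h]

lemma toggle_of_not_mem (s : PySem.Set Char) (c : Char) (h : c ∉ s) :
    pvToggle s c = PySem.Set.add s c := by
  have hc : PySem.Set.contains s c = false := by
    rw [Bool.eq_false_iff]; intro hb; exact h ((PySem.Set.contains_iff s c).1 hb)
  simp [pvToggle, h]

-- membership in the toggle fold: y is in the result iff membership in s xor (count in l is odd)
lemma mem_foldl_toggle (l : List Char) (s : PySem.Set Char) (y : Char) :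
    y ∈ l.foldl pvToggle s ↔ ((y ∈ s) ↔ l.count y % 2 = 0) := by
  induction l generalizing s with
  | nil => simp
  | cons c l ih =>
    simp only [List.foldl_cons, ih, List.count_cons]
    by_cases hcs : c ∈ s
    · rw [toggle_of_mem s c hcs, PySem.Set.mem_discard]
      by_cases hyc : y = c
      · subst hyc
        simp [hcs]
        omega
      · have hcy : ¬ c = y := fun h => hyc h.symm
        simp [hyc, hcy]
    · rw [toggle_of_not_mem s c hcs, PySem.Set.mem_add]
      by_cases hyc : y = c
      · subst hyc
        simp [hcs]
        omega
      · have hcy : ¬ c = y := fun h => hyc h.symm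
        simp [hyc, hcy]

lemma nodup_foldl_toggle (l : List Char) (s : PySem.Set Char) (h : s.Nodup) :
    (l.foldl pvToggle s).Nodup := by
  induction l generalizing s with
  | nil => exact h
  | cons c l ih =>
    simp only [List.foldl_cons]
    apply ih
    unfold pvToggle
    split
    · exact PySem.Set.nodup_discard _ _ h
    · exact PySem.Set.nodup_add _ _ h

-- a counting fold equals the length of the filtered list
lemma foldl_count_if (p : Char → Bool) (l : List Char) (n : Int) :
    l.foldl (fun acc x => if p x then acc + 1 else acc) n = n + ((l.filter p).length : Int) := by
  induction l generalizing n with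
  | nil => simp
  | cons c l ih =>
    simp only [List.foldl_cons, List.filter_cons]
    by_cases h : p c
    · simp [h, ih]; ring
    · simp [h, ih]

lemma pymod_two (n : Nat) : PySem.Int.mod (n : Int) 2 = ((n % 2 : Nat) : Int) := by
  simp [PySem.Int.mod, Int.fmod_eq_emod]

lemma lengths_eq (l : List Char) :
    ((PySem.Set.ofList l).filter (fun c => PySem.Int.mod ((l.count c : Int)) 2 != 0)).length
      = (l.foldl pvToggle PySem.Set.empty).length := by
  apply List.Perm.length_eq
  rw [List.perm_ext_iff_of_nodup
    (List.Nodup.filter _ (PySem.Set.nodup_ofList l))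
    (nodup_foldl_toggle l PySem.Set.empty (by simp [PySem.Set.empty]))]
  intro y
  rw [List.mem_filter, PySem.Set.mem_ofList, mem_foldl_toggle]
  have hempty : (y ∈ PySem.Set.empty) = False := by
    simp [PySem.Set.empty]
  rw [hempty, pymod_two]
  constructor
  · rintro ⟨hmem, hodd⟩
    simp at hodd ⊢
    omega
  · intro h
    have h' : ¬ (l.count y % 2 = 0) := by
      intro h0; simp [h0] at h
    refine ⟨List.count_pos_iff.1 (by omega), by simp; omega⟩

-- ===== VERDICT (by name: the statement is the Claim_ definition above) =====
theorem is_poly_spec : Claim_equal_is_poly := by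
  intro s _
  unfold Spec_is_poly is_poly is_poly_alt
  simp only [PySem.Dict.foldl_insert_getD_add_one_eq_counter, PySem.Dict.keys_counter,
    PySem.Dict.getD_counter]
  rw [foldl_count_if]
  have h := lengths_eq s.toList
  have hlen : PySem.Set.len (s.toList.foldl pvToggle PySem.Set.empty)
      = (s.toList.foldl pvToggle PySem.Set.empty).length := rfl
  rw [h, hlen] at *
  set n := (s.toList.foldl pvToggle PySem.Set.empty).length with hn
  by_cases hle : ((n : Int) ≤ 1)
  · rw [if_neg (by omega)]
    simp [hle]
  · rw [if_pos (by omega)]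
    simp [hle]
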